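-- pv_equiv track=rewrite | github.com/MandalaCloud/HeaderSplit | backend/code_element_graph_construction/weighted_edge.py | has_upper_and_lower
-- ===== SOURCE A (Python) =====
-- def has_upper_and_lower(text):
--     has_upper = False
--     has_lower = False
--
--     for char in text:
--         if char.isupper():
--             has_upper = True
--         elif char.islower():
--             has_lower = True
--         if has_upper and has_lower:
--             break
--     return has_upper and has_lower
-- ===== SOURCE B (Python) =====
-- def has_upper_and_lower(text):
--     return any(c.isupper() for c in text) and any(c.islower() for c in text)
-- ===== Notes on version B (the rewrite author's own statement) =====
-- stated objective: idiomatic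
-- what changed: Replaced the single flag-tracking loop with early break by two independent short-circuiting any() membership scans combined with and.
import Mathlib
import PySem

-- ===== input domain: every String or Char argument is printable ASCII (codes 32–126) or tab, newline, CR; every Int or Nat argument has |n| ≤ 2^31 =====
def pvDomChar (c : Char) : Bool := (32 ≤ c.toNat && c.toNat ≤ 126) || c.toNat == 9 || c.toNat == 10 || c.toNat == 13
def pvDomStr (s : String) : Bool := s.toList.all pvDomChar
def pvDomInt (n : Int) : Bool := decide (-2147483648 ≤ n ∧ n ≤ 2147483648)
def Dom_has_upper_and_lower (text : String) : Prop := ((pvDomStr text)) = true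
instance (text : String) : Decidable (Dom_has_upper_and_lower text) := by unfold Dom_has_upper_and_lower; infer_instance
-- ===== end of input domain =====

-- B replaces A's single flag-tracking loop (with early break) by two independent
-- short-circuiting `any` scans combined with `and`; objective: idiomatic.

-- ===== PORT A =====
-- A's for-loop with the two mutable flags and the break, as structural recursion
def hualLoop : List Char → Bool → Bool → Bool
  | [], has_upper, has_lower => has_upper && has_lower
  | c :: rest, has_upper, has_lower =>
    let has_upper' := if PySem.Chars.isupper c then true else has_upper
    let has_lower' := if PySem.Chars.isupper c then has_lower
                      else if PySem.Chars.islower c then true else has_lower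
    if has_upper' && has_lower' then has_upper' && has_lower'   -- break
    else hualLoop rest has_upper' has_lower'

def has_upper_and_lower (text : String) : Bool :=
  hualLoop text.toList false false

-- ===== PORT B =====
def has_upper_and_lower_alt (text : String) : Bool :=
  (text.toList.any (fun c => PySem.Chars.isupper c)) &&
  (text.toList.any (fun c => PySem.Chars.islower c))

-- ===== PRECONDITION & SPEC =====
def Spec_has_upper_and_lower (text : String) (out : Bool) : Prop := out = has_upper_and_lower_alt text
instance (text : String) (out : Bool) : Decidable (Spec_has_upper_and_lower text out) := by unfold Spec_has_upper_and_lower; infer_instance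

-- ===== CLAIM (what is proved, stated in full; the proofs are below) =====
def Claim_equal_has_upper_and_lower : Prop := ∀ (text : String), Dom_has_upper_and_lower text → Spec_has_upper_and_lower text (has_upper_and_lower text)

-- ===== LEMMAS AND PROOFS =====

theorem upper_not_lower (c : Char) (h : PySem.Chars.isupper c = true) :
    PySem.Chars.islower c = false := by
  simp [PySem.Chars.isupper, Char.le_def, UInt32.le_iff_toNat_le] at h
  simp [PySem.Chars.islower, Char.le_def, UInt32.le_iff_toNat_le]
  intro h2
  omega

theorem hualLoop_eq (cs : List Char) (hu hl : Bool) :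
    hualLoop cs hu hl =
      ((hu || cs.any (fun c => PySem.Chars.isupper c)) &&
       (hl || cs.any (fun c => PySem.Chars.islower c))) := by
  induction cs generalizing hu hl with
  | nil => simp [hualLoop]
  | cons c rest ih =>
    simp only [hualLoop, List.any_cons]
    by_cases hc : PySem.Chars.isupper c = true
    · have hl' := upper_not_lower c hc
      by_cases hb : hl = true
      · simp [hc, hl', hb]
      · simp at hb
        simp [hc, hl', hb, ih]
    · simp at hc
      by_cases hlo : PySem.Chars.islower c = true
      · by_cases hb : hu = true
        · simp [hc, hlo, hb]
        · simp at hb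
          simp [hc, hlo, hb, ih]
      · simp at hlo
        by_cases hb : (hu && hl) = true
        · simp_all
        · simp only [hc, hlo, Bool.false_or]
          simp [hb, ih]

-- ===== VERDICT (by name: the statement is the Claim_ definition above) =====
theorem has_upper_and_lower_spec : Claim_equal_has_upper_and_lower := by
  intro text _
  unfold Spec_has_upper_and_lower has_upper_and_lower has_upper_and_lower_alt
  simp [hualLoop_eq]
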